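-- pv_equiv track=rewrite | github.com/jezhuuz/Python-and-Assembly | PS3/ps3pr4.py | jscore
-- ===== SOURCE A (Python) =====
-- def rem_first(elem, values):
--     """ removes the first occurrence of elem (letter) from the string values
--     """
--     if values == '':
--         return ''
--     elif values[0] == elem:
--         return values[1:]
--     else:
--         result_rest = rem_first(elem, values[1:])
--         return values[0] + result_rest
--
-- def jscore(s1, s2):
--     ''' takes two strings s1 and s2 as inputs and returns the Jotto score
--         of s1 compared with s2....the number of characters in s1 that are
--         shared by s2.
--         used rem_first function but instead of list input, has string input
--     '''
--     score = 0
--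
--     if (s1 == '') or (s2 == ''):
--         return 0
--
--     elif s1[0] in s2:
--         score = score + 1
--         return score + jscore(s1[1:], rem_first(s1[0], s2))
--
--     else:
--         return score + jscore(s1[1:], s2)
-- ===== SOURCE B (Python) =====
-- def jscore(s1, s2):
--     f1 = {}
--     for c in s1:
--         f1[c] = f1.get(c, 0) + 1
--     f2 = {}
--     for c in s2:
--         f2[c] = f2.get(c, 0) + 1
--     score = 0
--     for c, n in f1.items():
--         if c in f2:
--             score += min(n, f2[c])
--     return score
-- ===== Notes on version B (the rewrite author's own statement) =====
-- stated objective: faster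
-- what changed: Replaced A's recursive scan of s1 with rem_first repeatedly re-scanning s2 (and Python recursion per character) by two single-pass character-frequency dicts and one loop summing min(freq1[c], freq2[c]) over shared characters.
import Mathlib
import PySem

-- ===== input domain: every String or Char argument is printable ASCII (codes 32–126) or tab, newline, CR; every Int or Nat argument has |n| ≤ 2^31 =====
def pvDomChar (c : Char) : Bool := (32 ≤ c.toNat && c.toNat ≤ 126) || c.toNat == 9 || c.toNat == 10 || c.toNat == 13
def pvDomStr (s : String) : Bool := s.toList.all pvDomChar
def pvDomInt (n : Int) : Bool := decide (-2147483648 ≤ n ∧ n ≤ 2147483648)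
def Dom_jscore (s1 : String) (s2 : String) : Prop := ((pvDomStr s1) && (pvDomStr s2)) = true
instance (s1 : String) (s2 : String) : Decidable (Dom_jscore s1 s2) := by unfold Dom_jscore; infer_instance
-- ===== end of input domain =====

-- B replaces A's per-character recursion with first-occurrence removal (repeated scans of s2)
-- by two single-pass frequency tables and one sum of min-counts over shared characters (objective: faster).

-- ===== PORT A =====
-- rem_first: recursion on the string's characters (strings are handled as their List Char)
def remFirstA (elem : Char) (values : List Char) : List Char :=
  match values with
  | [] => []
  | v :: rest => if v == elem then rest else v :: remFirstA elem rest

def jscoreA (l1 : List Char) (l2 : List Char) : Int :=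
  match l1, l2 with
  | [], _ => 0                 -- s1 == ''
  | _ :: _, [] => 0            -- s2 == ''
  | c :: t, l2'@(_ :: _) =>
      if l2'.contains c then 1 + jscoreA t (remFirstA c l2')   -- score+1, recurse on s1[1:], rem_first(s1[0], s2)
      else jscoreA t l2'

def jscore (s1 : String) (s2 : String) : Int := jscoreA s1.toList s2.toList

-- ===== PORT B =====
def jscore_alt (s1 : String) (s2 : String) : Int :=
  let f1 : PySem.Dict Char Int := s1.toList.foldl (fun d c => d.modify c 0 (· + 1)) PySem.Dict.empty
  let f2 : PySem.Dict Char Int := s2.toList.foldl (fun d c => d.modify c 0 (· + 1)) PySem.Dict.empty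
  f1.items.foldl (fun score p => if f2.contains p.1 then score + min p.2 (f2.getD p.1 0) else score) 0

-- ===== PRECONDITION & SPEC =====
def Spec_jscore (s1 : String) (s2 : String) (out : Int) : Prop := out = jscore_alt s1 s2
instance (s1 : String) (s2 : String) (out : Int) : Decidable (Spec_jscore s1 s2 out) := by unfold Spec_jscore; infer_instance

-- ===== CLAIM (what is proved, stated in full; the proofs are below) =====
def Claim_equal_jscore : Prop := ∀ (s1 : String) (s2 : String), Dom_jscore s1 s2 → Spec_jscore s1 s2 (jscore s1 s2)

-- ===== LEMMAS AND PROOFS =====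

theorem remFirstA_eq_erase (c : Char) (l : List Char) : remFirstA c l = l.erase c := by
  induction l with
  | nil => rfl
  | cons v rest ih => rw [remFirstA, List.erase_cons, ih]

-- A computes the size of the multiset intersection of the two character lists
theorem jscoreA_eq_card (l1 l2 : List Char) :
    jscoreA l1 l2 = (Multiset.card ((↑l1 : Multiset Char) ∩ ↑l2) : Int) := by
  induction l1 generalizing l2 with
  | nil => simp [jscoreA]
  | cons c t ih =>
    cases l2 with
    | nil => simp [jscoreA]
    | cons d e =>
      by_cases h : c ∈ (d :: e : List Char)
      · have hc : (d :: e : List Char).contains c = true := by simpa using h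
        have hm : c ∈ ((d :: e : List Char) : Multiset Char) := by simpa using h
        have hsplit : ((c :: t : List Char) : Multiset Char) ∩ ↑(d :: e)
            = c ::ₘ (↑t ∩ ((d :: e : List Char) : Multiset Char).erase c) := by
          rw [← Multiset.cons_coe, Multiset.cons_inter_of_pos _ hm]
        rw [jscoreA, if_pos hc, ih, remFirstA_eq_erase, hsplit, Multiset.coe_erase]
        push_cast [Multiset.card_cons]
        ring
      · have hm : c ∉ ((d :: e : List Char) : Multiset Char) := by simpa using h
        have hsplit : ((c :: t : List Char) : Multiset Char) ∩ ↑(d :: e)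
            = ↑t ∩ ((d :: e : List Char) : Multiset Char) := by
          rw [← Multiset.cons_coe, Multiset.cons_inter_of_neg _ hm]
        rw [jscoreA, if_neg (by simpa using h), ih, hsplit]

-- the multiset-intersection size as a sum of min-counts over the distinct characters of l1
theorem card_inter_eq_sum (l1 l2 : List Char) :
    Multiset.card ((↑l1 : Multiset Char) ∩ ↑l2) =
      ((PySem.Set.ofList l1).map (fun c => min (l1.count c) (l2.count c))).sum := by
  classical
  have hsub : ((↑l1 : Multiset Char) ∩ ↑l2).toFinset ⊆ l1.toFinset := by
    intro a ha
    rw [Multiset.mem_toFinset, Multiset.mem_inter] at ha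
    simpa [List.mem_toFinset] using ha.1
  calc Multiset.card ((↑l1 : Multiset Char) ∩ ↑l2)
      = ∑ a ∈ ((↑l1 : Multiset Char) ∩ ↑l2).toFinset, ((↑l1 : Multiset Char) ∩ ↑l2).count a :=
        (Multiset.toFinset_sum_count_eq _).symm
    _ = ∑ a ∈ l1.toFinset, ((↑l1 : Multiset Char) ∩ ↑l2).count a := by
        refine Finset.sum_subset hsub ?_
        intro x _ hnx
        exact Multiset.count_eq_zero.mpr (fun hmem => hnx (Multiset.mem_toFinset.mpr hmem))
    _ = ∑ a ∈ l1.toFinset, min (l1.count a) (l2.count a) := by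
        refine Finset.sum_congr rfl ?_
        intro a _
        rw [Multiset.count_inter, Multiset.coe_count, Multiset.coe_count]
    _ = ∑ a ∈ (PySem.Set.ofList l1).toFinset, min (l1.count a) (l2.count a) := by
        refine Finset.sum_congr ?_ (fun _ _ => rfl)
        ext a
        simp [List.mem_toFinset, PySem.Set.mem_ofList]
    _ = ((PySem.Set.ofList l1).map (fun c => min (l1.count c) (l2.count c))).sum :=
        List.sum_toFinset _ (PySem.Set.nodup_ofList l1)

-- the accumulation loop of B, summed out: the guard can be dropped because min (count) 0 = 0
theorem foldl_if_min (L M1 M2 : List Char) :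
    L.foldl (fun (score : Int) c =>
        if M2.contains c then score + min ((M1.count c : Int)) ((M2.count c : Int)) else score) 0
      = (L.map (fun c => min ((M1.count c : Int)) ((M2.count c : Int)))).sum := by
  have key : ∀ (acc : Int) (c : Char), c ∈ L →
      (if M2.contains c then acc + min ((M1.count c : Int)) ((M2.count c : Int)) else acc)
        = acc + min ((M1.count c : Int)) ((M2.count c : Int)) := by
    intro acc c _
    by_cases hc : M2.contains c
    · rw [if_pos hc]
    · rw [if_neg hc]
      have h0 : M2.count c = 0 := List.count_eq_zero.mpr (fun hm => hc (by simpa using hm))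
      rw [h0]
      have hmin : min ((M1.count c : Int)) (((0 : Nat) : Int)) = 0 :=
        min_eq_right (by exact_mod_cast Int.natCast_nonneg (M1.count c))
      rw [hmin, add_zero]
  rw [PySem.List.foldl_congr_mem _ _ _ _ key, PySem.List.foldl_add, zero_add]

-- B computes the same sum (over the Int-valued frequency tables)
theorem jscore_alt_eq_sum (s1 s2 : String) :
    jscore_alt s1 s2 =
      ((PySem.Set.ofList s1.toList).map
        (fun c => min ((s1.toList.count c : Int)) ((s2.toList.count c : Int)))).sum := by
  show (PySem.Dict.counter s1.toList).items.foldl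
      (fun score p => if (PySem.Dict.counter s2.toList).contains p.1 then
          score + min p.2 ((PySem.Dict.counter s2.toList).getD p.1 0) else score) 0 = _
  rw [PySem.Dict.items_counter, List.foldl_map]
  simp only [PySem.Dict.getD_counter, PySem.Dict.contains_counter]
  exact foldl_if_min _ _ _

-- ===== VERDICT (by name: the statement is the Claim_ definition above) =====
theorem jscore_spec : Claim_equal_jscore := by
  intro s1 s2 _
  show jscore s1 s2 = jscore_alt s1 s2
  rw [jscore, jscoreA_eq_card, card_inter_eq_sum, jscore_alt_eq_sum,
    Nat.cast_list_sum, List.map_map]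
  simp [Function.comp_def, Nat.cast_min]
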